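-- pv_equiv track=rewrite | github.com/jakubpradzynski/advent-of-code-2023 | Day 3/Gear Ratios.py | find_number_from_digit
-- ===== SOURCE A (Python) =====
-- def find_number_from_digit(lines: list[str], y: int, x: int) -> int:
--     line = lines[y]
--     width = len(line)
--     first_digit_index = x
--     last_digit_index = x
--     for i in range(x-1, -1, -1):
--         if line[i].isdigit():
--             first_digit_index = i
--         else:
--             break
--     for i in range(x+1, width):
--         if line[i].isdigit():
--             last_digit_index = i
--         else:
--             break
--     return int("".join(line[first_digit_index:last_digit_index+1]))
-- ===== SOURCE B (Python) =====
-- def find_number_from_digit(lines: list[str], y: int, x: int) -> int: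
--     line = lines[y]
--     # one pass over the line: collect (start, end) spans of consecutive digits
--     spans = []
--     start = None
--     for i, ch in enumerate(line):
--         if ch.isdigit():
--             if start is None:
--                 start = i
--         elif start is not None:
--             spans.append((start, i))
--             start = None
--     if start is not None:
--         spans.append((start, len(line)))
--     # locate the span containing x; the end is inclusive so a position just past
--     # a number (e.g. x == len(line) for a trailing number) still identifies it
--     for s, e in spans:
--         if s <= x <= e:
--             return int(line[s:e])
--     raise ValueError(f"no number at position {x}")
-- ===== Notes on version B (the rewrite author's own statement) =====
-- stated objective: alternative
-- what changed: A scans outward from x in two directions; B makes one left-to-right pass grouping consecutive digits into (start,end) spans and returns int of the span containing x.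
-- outside the precondition, e.g. on find_number_from_digit([' 7'], 0, 0): A returns 7, B raises ValueError; on find_number_from_digit(['5281'], 0, -1): A returns 1, B raises ValueError; on find_number_from_digit(['1_0'], 0, 1): A returns 10, B returns 1
import Mathlib
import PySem

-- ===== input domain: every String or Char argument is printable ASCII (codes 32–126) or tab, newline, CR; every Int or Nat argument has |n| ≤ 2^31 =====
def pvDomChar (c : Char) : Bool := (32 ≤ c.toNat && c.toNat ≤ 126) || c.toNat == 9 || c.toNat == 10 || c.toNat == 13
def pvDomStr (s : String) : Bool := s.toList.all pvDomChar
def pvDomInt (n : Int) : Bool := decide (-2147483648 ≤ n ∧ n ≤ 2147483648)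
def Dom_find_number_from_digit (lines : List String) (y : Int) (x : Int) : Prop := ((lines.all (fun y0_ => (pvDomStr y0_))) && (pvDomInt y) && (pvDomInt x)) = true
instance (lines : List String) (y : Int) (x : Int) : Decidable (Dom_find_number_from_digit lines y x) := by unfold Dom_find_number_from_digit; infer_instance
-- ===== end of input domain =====

-- B replaces A's two outward directional scans by ONE left-to-right pass building the
-- (start, end) spans of all digit runs, then locating the span containing x (alternative
-- decomposition, same order of cost; equivalence proved on the domain Pre_ below).

-- ===== PORT A =====
-- loop body of A's leftward scan 'for i in range(x-1,-1,-1)': break encoded by the Bool flag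
def pvStepL (cs : List Char) (st : Int × Bool) (i : Int) : Int × Bool :=
  if st.2 then st
  else if PySem.Chars.isdigit (PySem.List.pyGetD cs i ' ') then (i, false) else (st.1, true)

-- loop body of A's rightward scan 'for i in range(x+1, width)'
def pvStepR (cs : List Char) (st : Int × Bool) (i : Int) : Int × Bool :=
  if st.2 then st
  else if PySem.Chars.isdigit (PySem.List.pyGetD cs i ' ') then (i, false) else (st.1, true)

def find_number_from_digit (lines : List String) (y : Int) (x : Int) : Int :=
  let line := (PySem.List.pyGet? lines y).getD ""   -- lines[y]; Pre_ guarantees the index is valid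
  let cs := line.toList
  let width : Int := cs.length
  let resL := (PySem.List.pyRange (x - 1) (-1) (-1)).foldl (pvStepL cs) (x, false)
  let resR := (PySem.List.pyRange (x + 1) width 1).foldl (pvStepR cs) (x, false)
  -- int("".join(line[first : last+1])); Pre_ guarantees int() succeeds, so getD 0 is never taken
  (PySem.Int.ofChars? (PySem.List.slice cs (some resL.1) (some (resR.1 + 1)))).getD 0

-- ===== PORT B =====
-- loop body of B's single pass over enumerate(line): state = (spans so far, open run start)
def pvStepB (acc : List (Int × Int) × Option Int) (p : Int × Char) : List (Int × Int) × Option Int :=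
  if PySem.Chars.isdigit p.2 then
    (acc.1, match acc.2 with | none => some p.1 | some s => some s)
  else match acc.2 with
    | some s => (acc.1 ++ [(s, p.1)], none)
    | none => acc

-- B's final loop 'for s, e in spans: if s <= x <= e: return int(line[s:e])'
-- (Python raises ValueError when no span contains x; Pre_ excludes those inputs, 0 here)
def pvFindSpan (cs : List Char) (x : Int) : List (Int × Int) → Int
  | [] => 0
  | (s, e) :: rest =>
      if s ≤ x ∧ x ≤ e then (PySem.Int.ofChars? (PySem.List.slice cs (some s) (some e))).getD 0
      else pvFindSpan cs x rest

def find_number_from_digit_alt (lines : List String) (y : Int) (x : Int) : Int :=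
  let line := (PySem.List.pyGet? lines y).getD ""
  let cs := line.toList
  let acc := (PySem.List.enumerate cs 0).foldl pvStepB ([], none)
  let spans := match acc.2 with
    | some s => acc.1 ++ [(s, (cs.length : Int))]
    | none => acc.1
  pvFindSpan cs x spans

-- ===== PRECONDITION & SPEC =====
-- Pre_ is the function's natural domain: y a valid (possibly negative, Python-style) line
-- index and x either the position of a digit in that line or the position just past a
-- trailing number (x == len(line), where A's clamped slice returns that number and so does
-- B's span lookup).  It excludes the remaining inputs, on which A raises (x past the line:
-- IndexError; int() of a non-number: ValueError) or returns a value only through accidents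
-- of Python's int()/indexing (negative x wrapping around, whitespace/sign/underscore
-- tolerance of int()); there B either raises ValueError or returns the adjacent number.
def Pre_find_number_from_digit (lines : List String) (y : Int) (x : Int) : Prop :=
  PySem.Raise.InRange lines.length y ∧ 0 ≤ x ∧
  ((x < (((PySem.List.pyGet? lines y).getD "").toList.length : Int) ∧
    PySem.Chars.isdigit (((PySem.List.pyGet? lines y).getD "").toList.getD x.toNat ' ') = true) ∨
   (x = (((PySem.List.pyGet? lines y).getD "").toList.length : Int) ∧
    0 < ((PySem.List.pyGet? lines y).getD "").toList.length ∧
    PySem.Chars.isdigit (((PySem.List.pyGet? lines y).getD "").toList.getD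
      (((PySem.List.pyGet? lines y).getD "").toList.length - 1) ' ') = true))

instance (lines : List String) (y : Int) (x : Int) : Decidable (Pre_find_number_from_digit lines y x) := by
  unfold Pre_find_number_from_digit; infer_instance

def pvWitness_find_number_from_digit : List String × Int × Int := (["a123b."], 0, 2)

def Spec_find_number_from_digit (lines : List String) (y : Int) (x : Int) (out : Int) : Prop := out = find_number_from_digit_alt lines y x
instance (lines : List String) (y : Int) (x : Int) (out : Int) : Decidable (Spec_find_number_from_digit lines y x out) := by unfold Spec_find_number_from_digit; infer_instance

-- ===== CLAIM (what is proved, stated in full; the proofs are below) =====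
def Claim_equal_find_number_from_digit : Prop := ∀ (lines : List String) (y : Int) (x : Int), Dom_find_number_from_digit lines y x → Pre_find_number_from_digit lines y x → Spec_find_number_from_digit lines y x (find_number_from_digit lines y x)

-- ===== LEMMAS AND PROOFS =====

-- length of the digit suffix of t (the run A's left scan walks over)
def pvLsuf (t : List Char) : Nat := (t.reverse.takeWhile PySem.Chars.isdigit).length
-- length of the digit prefix of t (the run A's right scan walks over)
def pvPpre (t : List Char) : Nat := (t.takeWhile PySem.Chars.isdigit).length

-- reference description of the span list B's fold builds: runs of digits of cs,
-- positions counted from j, with st an already-open run start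
def pvRuns (st : Option Int) (j : Nat) : List Char → List (Int × Int)
  | [] => (match st with | some s => [(s, (j : Int))] | none => [])
  | c :: cs =>
      if PySem.Chars.isdigit c then
        pvRuns (match st with | none => some (j : Int) | some s => some s) (j + 1) cs
      else
        (match st with | some s => [(s, (j : Int))] | none => []) ++ pvRuns none (j + 1) cs

-- left endpoint of the run containing position j+k, given pending start st
def pvLstart (st : Option Int) (j : Nat) (cs : List Char) (k : Nat) : Int :=
  if pvLsuf (cs.take k) = k then (match st with | some s => s | none => (j : Int))
  else ((j + k : Nat) : Int) - pvLsuf (cs.take k)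

theorem pvLsuf_le (t : List Char) : pvLsuf t ≤ t.length := by
  simpa [pvLsuf] using ((List.takeWhile_sublist (p := PySem.Chars.isdigit) (l := t.reverse)).length_le)

theorem pvLsuf_concat (t : List Char) (c : Char) :
    pvLsuf (t ++ [c]) = if PySem.Chars.isdigit c then pvLsuf t + 1 else 0 := by
  simp only [pvLsuf, List.reverse_append, List.reverse_cons, List.reverse_nil, List.nil_append,
    List.cons_append, List.takeWhile_cons]
  cases h : PySem.Chars.isdigit c <;> simp

theorem pvLsuf_cons (c : Char) (t : List Char) :
    pvLsuf (c :: t) =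
      if PySem.Chars.isdigit c ∧ pvLsuf t = t.length then t.length + 1 else pvLsuf t := by
  simp only [pvLsuf, List.reverse_cons, List.takeWhile_append]
  by_cases hall : (t.reverse.takeWhile PySem.Chars.isdigit).length = t.reverse.length
  · cases h : PySem.Chars.isdigit c <;> simp [hall, h]
  · have hlt : (t.reverse.takeWhile PySem.Chars.isdigit).length < t.length := by
      have := ((List.takeWhile_sublist (p := PySem.Chars.isdigit) (l := t.reverse)).length_le)
      simp only [List.length_reverse] at this hall
      omega
    have hall' : ¬ (List.takeWhile PySem.Chars.isdigit t.reverse).length = t.reverse.length := by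
      simpa using hall
    rw [if_neg hall']
    have : ¬ (PySem.Chars.isdigit c = true ∧ (List.takeWhile PySem.Chars.isdigit t.reverse).length = t.length) := by
      intro h; omega
    rw [if_neg this]

theorem pvPpre_cons (c : Char) (t : List Char) :
    pvPpre (c :: t) = if PySem.Chars.isdigit c then pvPpre t + 1 else 0 := by
  simp only [pvPpre, List.takeWhile_cons]
  cases h : PySem.Chars.isdigit c <;> simp

-- a broken left scan stays broken
theorem foldl_stepL_broken (cs : List Char) (f : Int) (l : List Int) :
    l.foldl (pvStepL cs) (f, true) = (f, true) := by
  induction l with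
  | nil => rfl
  | cons i l ih => simpa [pvStepL] using ih

theorem foldl_stepR_broken (cs : List Char) (f : Int) (l : List Int) :
    l.foldl (pvStepR cs) (f, true) = (f, true) := by
  induction l with
  | nil => rfl
  | cons i l ih => simpa [pvStepR] using ih

-- A's left scan lands on x - (digit suffix of line[:x])
theorem scanL_eq (cs : List Char) (n : Nat) (hn : n ≤ cs.length) :
    (((PySem.List.pyRange ((n : Int) - 1) (-1) (-1)).foldl (pvStepL cs) ((n : Int), false)).1)
      = (n : Int) - pvLsuf (cs.take n) := by
  induction n with
  | zero =>
      rw [PySem.List.pyRange_neg_one_eq_nil (by omega)]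
      simp [pvLsuf]
  | succ m ih =>
      have hm : m < cs.length := by omega
      have hrange : PySem.List.pyRange (((m + 1 : Nat) : Int) - 1) (-1) (-1)
          = ((m : Nat) : Int) :: PySem.List.pyRange (((m : Nat) : Int) - 1) (-1) (-1) := by
        have h1 : (((m + 1 : Nat) : Int) - 1) = ((m : Nat) : Int) := by push_cast; ring
        rw [h1, PySem.List.pyRange_neg_one_cons (by omega)]
      rw [hrange]
      have htake : cs.take (m + 1) = cs.take m ++ [cs[m]] := by
        rw [List.take_add_one]
        simp [List.getElem?_eq_getElem hm]
      simp only [List.foldl_cons]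
      by_cases hd : PySem.Chars.isdigit cs[m] = true
      · have hstep : pvStepL cs (((m + 1 : Nat) : Int), false) ((m : Nat) : Int)
            = (((m : Nat) : Int), false) := by
          simp [pvStepL, PySem.List.pyGetD_natCast, List.getElem?_eq_getElem hm, hd]
        rw [hstep, ih (by omega), htake, pvLsuf_concat]
        rw [if_pos hd]
        push_cast
        ring
      · have hstep : pvStepL cs (((m + 1 : Nat) : Int), false) ((m : Nat) : Int)
            = (((m + 1 : Nat) : Int), true) := by
          simp [pvStepL, PySem.List.pyGetD_natCast, List.getElem?_eq_getElem hm, hd]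
        rw [hstep, foldl_stepL_broken, htake, pvLsuf_concat]
        simp [hd]

-- A's right scan: last index of the digit prefix of line[j:], or `last` if none
theorem scanR_eq (cs : List Char) (m : Nat) :
    ∀ (j : Nat) (last : Int), cs.length = j + m →
    (((PySem.List.pyRange (j : Int) ((cs.length : Nat) : Int) 1).foldl (pvStepR cs) (last, false)).1)
      = if pvPpre (cs.drop j) = 0 then last else (j : Int) + pvPpre (cs.drop j) - 1 := by
  induction m with
  | zero =>
      intro j last hj
      rw [PySem.List.pyRange_one_eq_nil (by omega)]
      have : cs.drop j = [] := by
        apply List.drop_eq_nil_of_le; omega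
      simp [this, pvPpre]
  | succ m ih =>
      intro j last hj
      have hm : j < cs.length := by omega
      have hrange : PySem.List.pyRange ((j : Nat) : Int) ((cs.length : Nat) : Int) 1
          = ((j : Nat) : Int) :: PySem.List.pyRange (((j + 1 : Nat) : Int)) ((cs.length : Nat) : Int) 1 := by
        rw [PySem.List.pyRange_one_cons (by exact_mod_cast hm)]
        push_cast; ring_nf
      have hdrop : cs.drop j = cs[j] :: cs.drop (j + 1) := List.drop_eq_getElem_cons hm
      rw [hrange]
      simp only [List.foldl_cons]
      by_cases hd : PySem.Chars.isdigit cs[j] = true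
      · have hstep : pvStepR cs (last, false) ((j : Nat) : Int) = (((j : Nat) : Int), false) := by
          simp [pvStepR, PySem.List.pyGetD_natCast, List.getElem?_eq_getElem hm, hd]
        rw [hstep, ih (j + 1) _ (by omega), hdrop, pvPpre_cons, if_pos hd]
        by_cases hp : pvPpre (cs.drop (j + 1)) = 0
        · rw [if_pos hp, if_neg (by omega), hp]
          push_cast; ring
        · rw [if_neg hp, if_neg (by omega)]
          push_cast; ring
      · have hstep : pvStepR cs (last, false) ((j : Nat) : Int) = (last, true) := by
          simp [pvStepR, PySem.List.pyGetD_natCast, List.getElem?_eq_getElem hm, hd]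
        rw [hstep, foldl_stepR_broken, hdrop, pvPpre_cons]
        simp [hd]

-- B's fold builds exactly pvRuns
theorem foldB_eq (cs : List Char) :
    ∀ (j : Nat) (sp : List (Int × Int)) (st : Option Int),
    (match ((PySem.List.enumerate cs (j : Int)).foldl pvStepB (sp, st)).2 with
      | some s => ((PySem.List.enumerate cs (j : Int)).foldl pvStepB (sp, st)).1 ++ [(s, ((j : Int) + cs.length))]
      | none => ((PySem.List.enumerate cs (j : Int)).foldl pvStepB (sp, st)).1)
      = sp ++ pvRuns st j cs := by
  induction cs with
  | nil => intro j sp st; cases st <;> simp [PySem.List.enumerate_nil, pvRuns]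
  | cons c cs ih =>
      intro j sp st
      have henum : PySem.List.enumerate (c :: cs) ((j : Nat) : Int)
          = (((j : Nat) : Int), c) :: PySem.List.enumerate cs (((j + 1 : Nat) : Int)) := by
        rw [PySem.List.enumerate_cons]
        push_cast; ring_nf
      rw [henum]
      simp only [List.foldl_cons]
      by_cases hd : PySem.Chars.isdigit c = true
      · rw [show pvStepB (sp, st) (((j : Nat) : Int), c)
            = (sp, match st with | none => some ((j : Nat) : Int) | some s => some s) from by
              simp [pvStepB, hd]]
        have hlen : ((j : Nat) : Int) + ((c :: cs).length : Int) = (((j+1 : Nat)) : Int) + (cs.length : Int) := by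
          push_cast; simp; ring
        rw [hlen, ih (j + 1) sp _]
        have : pvRuns st j (c :: cs)
            = pvRuns (match st with | none => some ((j : Nat) : Int) | some s => some s) (j + 1) cs := by
          simp only [pvRuns, hd]; simp
        rw [this]
      · cases st with
        | none =>
            rw [show pvStepB (sp, none) (((j : Nat) : Int), c) = (sp, none) from by simp [pvStepB, hd]]
            have hlen : ((j : Nat) : Int) + ((c :: cs).length : Int) = (((j+1 : Nat)) : Int) + (cs.length : Int) := by
              push_cast; simp; ring
            rw [hlen, ih (j + 1) sp none]
            have : pvRuns none j (c :: cs) = pvRuns none (j + 1) cs := by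
              simp only [pvRuns, hd]; simp
            rw [this]
        | some s =>
            rw [show pvStepB (sp, some s) (((j : Nat) : Int), c)
                = (sp ++ [(s, ((j : Nat) : Int))], none) from by simp [pvStepB, hd]]
            have hlen : ((j : Nat) : Int) + ((c :: cs).length : Int) = (((j+1 : Nat)) : Int) + (cs.length : Int) := by
              push_cast; simp; ring
            rw [hlen, ih (j + 1) _ none]
            have : pvRuns (some s) j (c :: cs) = [(s, ((j : Nat) : Int))] ++ pvRuns none (j + 1) cs := by
              simp only [pvRuns, hd]; simp
            rw [this, List.append_assoc]

-- lookup of a position left of j in runs with an open start s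
theorem findSpan_runs_left (full : List Char) :
    ∀ (cs : List Char) (j : Nat) (s x : Int), s ≤ x → x < (j : Int) →
    pvFindSpan full x (pvRuns (some s) j cs)
      = (PySem.Int.ofChars? (PySem.List.slice full (some s) (some ((j : Int) + pvPpre cs)))).getD 0 := by
  intro cs
  induction cs with
  | nil =>
      intro j s x hsx hxj
      rw [pvRuns]
      simp only [pvFindSpan]
      rw [if_pos ⟨hsx, le_of_lt hxj⟩]
      simp [pvPpre]
  | cons c cs ih =>
      intro j s x hsx hxj
      by_cases hd : PySem.Chars.isdigit c = true
      · have : pvRuns (some s) j (c :: cs) = pvRuns (some s) (j + 1) cs := by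
          simp only [pvRuns, hd]; simp
        rw [this, ih (j + 1) s x hsx (by push_cast at hxj ⊢; omega)]
        rw [pvPpre_cons, if_pos hd]
        have : ((j + 1 : Nat) : Int) + ((pvPpre cs : Nat) : Int) = (j : Int) + ((pvPpre cs + 1 : Nat) : Int) := by
          push_cast; ring
        rw [this]
      · have : pvRuns (some s) j (c :: cs) = (s, (j : Int)) :: pvRuns none (j + 1) cs := by
          simp only [pvRuns, hd]; simp
        rw [this]
        simp only [pvFindSpan]
        rw [if_pos ⟨hsx, le_of_lt hxj⟩, pvPpre_cons, if_neg hd]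
        simp


theorem pvRuns_cons_digit (st : Option Int) (j : Nat) (c : Char) (cs : List Char)
    (hd : PySem.Chars.isdigit c = true) :
    pvRuns st j (c :: cs)
      = pvRuns (match st with | none => some ((j : Nat) : Int) | some s => some s) (j + 1) cs := by
  cases st <;> simp [pvRuns, hd]

theorem pvRuns_cons_nondigit_none (j : Nat) (c : Char) (cs : List Char)
    (hd : ¬ PySem.Chars.isdigit c = true) :
    pvRuns none j (c :: cs) = pvRuns none (j + 1) cs := by
  simp [pvRuns, hd]

theorem pvRuns_cons_nondigit_some (s : Int) (j : Nat) (c : Char) (cs : List Char)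
    (hd : ¬ PySem.Chars.isdigit c = true) :
    pvRuns (some s) j (c :: cs) = (s, ((j : Nat) : Int)) :: pvRuns none (j + 1) cs := by
  simp [pvRuns, hd]

theorem pvLstart_zero (st : Option Int) (j : Nat) (cs : List Char) :
    pvLstart st j cs 0 = (match st with | some s => s | none => (j : Int)) := by
  simp [pvLstart, pvLsuf]

theorem pvLstart_cons_digit (st : Option Int) (j k : Nat) (c : Char) (cs : List Char)
    (hd : PySem.Chars.isdigit c = true) (hk : k ≤ cs.length) :
    pvLstart st j (c :: cs) (k + 1)
      = pvLstart (match st with | none => some ((j : Nat) : Int) | some s => some s) (j + 1) cs k := by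
  have ht : (cs.take k).length = k := by simp [List.length_take]; omega
  have hLle : pvLsuf (cs.take k) ≤ k := by have := pvLsuf_le (cs.take k); omega
  by_cases hL : pvLsuf (cs.take k) = k
  · have hLc : pvLsuf (c :: cs.take k) = k + 1 := by
      rw [pvLsuf_cons, if_pos ⟨hd, by rw [ht]; exact hL⟩, ht]
    cases st <;> simp [pvLstart, hLc, hL]
  · have hLc : pvLsuf (c :: cs.take k) = pvLsuf (cs.take k) := by
      rw [pvLsuf_cons, if_neg (by rw [ht]; intro h; exact hL h.2)]
    simp only [pvLstart, List.take_succ_cons, hLc]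
    rw [if_neg (by omega), if_neg hL]
    push_cast; ring

theorem pvLstart_cons_nondigit (st : Option Int) (j k : Nat) (c : Char) (cs : List Char)
    (hd : ¬ PySem.Chars.isdigit c = true) (hk : k ≤ cs.length) :
    pvLstart st j (c :: cs) (k + 1) = pvLstart none (j + 1) cs k := by
  have ht : (cs.take k).length = k := by simp [List.length_take]; omega
  have hLle : pvLsuf (cs.take k) ≤ k := by have := pvLsuf_le (cs.take k); omega
  have hLc : pvLsuf (c :: cs.take k) = pvLsuf (cs.take k) := by
    rw [pvLsuf_cons, if_neg (by intro h; exact hd h.1)]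
  by_cases hL : pvLsuf (cs.take k) = k
  · simp only [pvLstart, List.take_succ_cons, hLc]
    rw [if_neg (by omega), if_pos hL, hL]
    push_cast; ring
  · simp only [pvLstart, List.take_succ_cons, hLc]
    rw [if_neg (by omega), if_neg hL]
    push_cast; ring

-- main lookup lemma: position j+k holds a digit; the span found is the surrounding digit run
theorem findSpan_runs (full : List Char) :
    ∀ (cs : List Char) (j k : Nat) (st : Option Int) (hk : k < cs.length),
    PySem.Chars.isdigit cs[k] = true →
    (∀ s, st = some s → s < (j : Int)) →
    pvFindSpan full ((j + k : Nat) : Int) (pvRuns st j cs)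
      = (PySem.Int.ofChars? (PySem.List.slice full (some (pvLstart st j cs k))
          (some (((j + k : Nat) : Int) + 1 + pvPpre (cs.drop (k + 1)))))).getD 0 := by
  intro cs
  induction cs with
  | nil => intro j k st hk; simp at hk
  | cons c cs ih =>
      intro j k st hk hdig hst
      match k with
      | 0 =>
          have hd : PySem.Chars.isdigit c = true := by simpa using hdig
          rw [pvRuns_cons_digit st j c cs hd, pvLstart_zero]
          cases st with
          | none =>
              rw [findSpan_runs_left full cs (j + 1) ((j : Nat) : Int) _ (by push_cast; omega) (by push_cast; omega)]
              have : ((j + 1 : Nat) : Int) + ((pvPpre cs : Nat) : Int)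
                  = ((j + 0 : Nat) : Int) + 1 + pvPpre ((c :: cs).drop (0 + 1)) := by
                simp
              rw [this]
          | some s =>
              have hs : s < ((j : Nat) : Int) := hst s rfl
              rw [findSpan_runs_left full cs (j + 1) s _ (by push_cast; omega) (by push_cast; omega)]
              have : ((j + 1 : Nat) : Int) + ((pvPpre cs : Nat) : Int)
                  = ((j + 0 : Nat) : Int) + 1 + pvPpre ((c :: cs).drop (0 + 1)) := by
                simp
              rw [this]
      | k' + 1 =>
          have hk' : k' < cs.length := by simpa using hk
          have hdig' : PySem.Chars.isdigit cs[k'] = true := by simpa using hdig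
          have hnat : j + (k' + 1) = (j + 1) + k' := by omega
          have hdrop : (c :: cs).drop (k' + 1 + 1) = cs.drop (k' + 1) := by simp
          by_cases hd : PySem.Chars.isdigit c = true
          · rw [pvRuns_cons_digit st j c cs hd, hdrop, hnat,
              pvLstart_cons_digit st j k' c cs hd (by omega),
              ih (j + 1) k' _ hk' hdig' (by
                intro s hs
                cases st with
                | none => simp at hs; subst hs; push_cast; omega
                | some s0 =>
                    simp at hs
                    have := hst s0 rfl
                    push_cast at this ⊢; omega)]
          · cases st with
            | none =>
                rw [pvRuns_cons_nondigit_none j c cs hd, hdrop, hnat,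
                  pvLstart_cons_nondigit none j k' c cs hd (by omega),
                  ih (j + 1) k' none hk' hdig' (by intro s hs; simp at hs)]
            | some s0 =>
                rw [pvRuns_cons_nondigit_some s0 j c cs hd]
                simp only [pvFindSpan]
                rw [if_neg (by push_cast; omega)]
                rw [hdrop, hnat,
                  pvLstart_cons_nondigit (some s0) j k' c cs hd (by omega),
                  ih (j + 1) k' none hk' hdig' (by intro s hs; simp at hs)]

theorem pvLsuf_pos (cs : List Char) (h : cs ≠ [])
    (hd : PySem.Chars.isdigit (cs.getLast h) = true) : 0 < pvLsuf cs := by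
  have hsplit : cs.dropLast ++ [cs.getLast h] = cs := List.dropLast_append_getLast h
  have := pvLsuf_concat cs.dropLast (cs.getLast h)
  rw [hsplit, hd] at this
  simp at this
  omega

-- lookup of the position one past the end of the line: the trailing run is found
theorem findSpan_runs_end (full : List Char) :
    ∀ (cs : List Char) (j : Nat) (st : Option Int),
    (∀ s, st = some s → s < (j : Int)) →
    (0 < pvLsuf cs ∨ (cs = [] ∧ st ≠ none)) →
    pvFindSpan full ((j + cs.length : Nat) : Int) (pvRuns st j cs)
      = (PySem.Int.ofChars? (PySem.List.slice full (some (pvLstart st j cs cs.length))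
          (some ((j + cs.length : Nat) : Int)))).getD 0 := by
  intro cs
  induction cs with
  | nil =>
      intro j st hst htail
      rcases htail with h0 | ⟨-, hsome⟩
      · simp [pvLsuf] at h0
      · match st, hsome with
        | some s, _ =>
            rw [pvRuns]
            simp only [pvFindSpan]
            rw [if_pos ⟨le_of_lt (by simpa using hst s rfl), by simp⟩]
            simp [pvLstart_zero]
  | cons c cs ih =>
      intro j st hst htail
      simp only [List.length_cons]
      have hnat : j + (cs.length + 1) = (j + 1) + cs.length := by omega
      rw [hnat]
      by_cases hd : PySem.Chars.isdigit c = true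
      · have hst' : ∀ s, (match st with | none => some ((j : Nat) : Int) | some s => some s) = some s
            → s < ((j + 1 : Nat) : Int) := by
          intro s hs
          cases st with
          | none => simp at hs; subst hs; push_cast; omega
          | some s0 => simp at hs; have := hst s0 rfl; push_cast at this ⊢; omega
        have htail' : 0 < pvLsuf cs ∨ (cs = [] ∧ (match st with | none => some ((j : Nat) : Int) | some s => some s) ≠ none) := by
          by_cases hce : cs = []
          · right; exact ⟨hce, by cases st <;> simp⟩
          · left
            rcases htail with h0 | ⟨habs, -⟩
            · rw [pvLsuf_cons] at h0
              split at h0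
              · rename_i hb
                have : (cs.take cs.length).length = cs.length := by simp
                have hlen0 : 0 < cs.length := List.length_pos_of_ne_nil hce
                omega
              · exact h0
            · exact absurd habs (by simp)
        rw [pvRuns_cons_digit st j c cs hd,
          pvLstart_cons_digit st j cs.length c cs hd (le_refl _),
          ih (j + 1) _ hst' htail']
      · have h0 : 0 < pvLsuf (c :: cs) := by
          rcases htail with h0 | ⟨habs, -⟩
          · exact h0
          · exact absurd habs (by simp)
        have hLc : pvLsuf (c :: cs) = pvLsuf cs := by
          rw [pvLsuf_cons, if_neg (by intro h; exact hd h.1)]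
        have hcs0 : 0 < pvLsuf cs := by omega
        have hce : cs ≠ [] := by intro h; rw [h] at hcs0; simp [pvLsuf] at hcs0
        have hst0 : ∀ s : Int, (none : Option Int) = some s → s < ((j + 1 : Nat) : Int) := by
          intro s hs; simp at hs
        have hlen0 : 0 < cs.length := List.length_pos_of_ne_nil hce
        cases st with
        | none =>
            rw [pvRuns_cons_nondigit_none j c cs hd,
              pvLstart_cons_nondigit none j cs.length c cs hd (le_refl _),
              ih (j + 1) none hst0 (Or.inl hcs0)]
        | some s0 =>
            rw [pvRuns_cons_nondigit_some s0 j c cs hd]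
            simp only [pvFindSpan]
            rw [if_neg (by push_cast; omega)]
            rw [pvLstart_cons_nondigit (some s0) j cs.length c cs hd (le_refl _),
              ih (j + 1) none hst0 (Or.inl hcs0)]

theorem slice_past_end (cs : List Char) (a : Nat) :
    PySem.List.slice cs (some ((a : Nat) : Int)) (some ((cs.length : Int) + 1))
      = PySem.List.slice cs (some ((a : Nat) : Int)) (some ((cs.length : Nat) : Int)) := by
  rw [show ((cs.length : Int) + 1) = ((cs.length + 1 : Nat) : Int) from by push_cast; ring]
  rw [PySem.List.slice_natCast, PySem.List.slice_natCast]
  rw [List.take_of_length_le (by simp; omega), List.take_of_length_le (by simp)]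

-- ===== VERDICT (by name: the statement is the Claim_ definition above) =====
theorem find_number_from_digit_spec : Claim_equal_find_number_from_digit := by
  intro lines y x hdom hpre
  obtain ⟨hy, hx0, hcase⟩ := hpre
  unfold Spec_find_number_from_digit
  obtain ⟨n, rfl⟩ : ∃ n : Nat, x = (n : Int) := ⟨x.toNat, (Int.toNat_of_nonneg hx0).symm⟩
  set cs : List Char := ((PySem.List.pyGet? lines y).getD "").toList with hcs
  rcases hcase with ⟨hxlt, hdig⟩ | ⟨hxe, hlen, hdig⟩
  · -- x is the position of a digit in the line
    have hn : n < cs.length := by exact_mod_cast hxlt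
    have hdig' : PySem.Chars.isdigit cs[n] = true := by
      have : ((n : Int)).toNat = n := by simp
      rw [this] at hdig
      rwa [List.getD_eq_getElem cs ' ' hn] at hdig
    have hbound : (if pvPpre (cs.drop (n + 1)) = 0 then ((n : Nat) : Int)
          else ((n + 1 : Nat) : Int) + pvPpre (cs.drop (n + 1)) - 1) + 1
        = ((n : Nat) : Int) + 1 + pvPpre (cs.drop (n + 1)) := by
      split_ifs with hp
      · rw [hp]; push_cast; ring
      · push_cast; ring
    have hA : find_number_from_digit lines y ((n : Nat) : Int)
        = (PySem.Int.ofChars? (PySem.List.slice cs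
            (some (((n : Nat) : Int) - pvLsuf (cs.take n)))
            (some (((n : Nat) : Int) + 1 + pvPpre (cs.drop (n + 1)))))).getD 0 := by
      simp only [find_number_from_digit, ← hcs]
      rw [scanL_eq cs n hn.le]
      rw [show ((n : Nat) : Int) + 1 = ((n + 1 : Nat) : Int) from by push_cast; ring]
      rw [scanR_eq cs (cs.length - (n + 1)) (n + 1) ((n : Nat) : Int) (by omega)]
      rw [hbound]
      norm_cast
    have hLst : pvLstart none 0 cs n = ((n : Nat) : Int) - pvLsuf (cs.take n) := by
      by_cases hL : pvLsuf (cs.take n) = n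
      · simp [pvLstart, hL]
      · simp [pvLstart, hL]
    have hB : find_number_from_digit_alt lines y ((n : Nat) : Int)
        = (PySem.Int.ofChars? (PySem.List.slice cs
            (some (((n : Nat) : Int) - pvLsuf (cs.take n)))
            (some (((n : Nat) : Int) + 1 + pvPpre (cs.drop (n + 1)))))).getD 0 := by
      simp only [find_number_from_digit_alt, ← hcs]
      have h0 := foldB_eq cs 0 []
      simp only [Nat.cast_zero, zero_add, List.nil_append] at h0
      rw [h0 none]
      have hfs := findSpan_runs cs cs 0 n none hn hdig' (by intro s hs; simp at hs)
      simp only [Nat.zero_add] at hfs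
      rw [hfs, hLst]
    rw [hA, hB]
  · -- x is one past the end of a line that ends in a digit
    have hn : n = cs.length := by exact_mod_cast hxe
    subst hn
    have hne : cs ≠ [] := List.ne_nil_of_length_pos hlen
    have hlast : PySem.Chars.isdigit (cs.getLast hne) = true := by
      rw [List.getLast_eq_getElem]
      rwa [List.getD_eq_getElem cs ' ' (by omega)] at hdig
    have hL0 : 0 < pvLsuf cs := pvLsuf_pos cs hne hlast
    have hLle : pvLsuf cs ≤ cs.length := pvLsuf_le cs
    have hA : find_number_from_digit lines y ((cs.length : Nat) : Int)
        = (PySem.Int.ofChars? (PySem.List.slice cs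
            (some (((cs.length : Nat) : Int) - pvLsuf cs))
            (some (((cs.length : Nat) : Int) + 1)))).getD 0 := by
      simp only [find_number_from_digit, ← hcs]
      rw [scanL_eq cs cs.length (le_refl _), List.take_length]
      rw [PySem.List.pyRange_one_eq_nil (by omega)]
      simp
    have hLst : pvLstart none 0 cs cs.length = ((cs.length : Nat) : Int) - pvLsuf cs := by
      by_cases hL : pvLsuf cs = cs.length
      · simp [pvLstart, List.take_length, hL]
      · simp [pvLstart, List.take_length, hL]
    have hB : find_number_from_digit_alt lines y ((cs.length : Nat) : Int)
        = (PySem.Int.ofChars? (PySem.List.slice cs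
            (some (((cs.length : Nat) : Int) - pvLsuf cs))
            (some ((cs.length : Nat) : Int)))).getD 0 := by
      simp only [find_number_from_digit_alt, ← hcs]
      have h0 := foldB_eq cs 0 []
      simp only [Nat.cast_zero, zero_add, List.nil_append] at h0
      rw [h0 none]
      have hfs := findSpan_runs_end cs cs 0 none (by intro s hs; simp at hs) (Or.inl hL0)
      simp only [Nat.zero_add] at hfs
      rw [hfs, hLst]
    rw [hA, hB]
    have ha : ((cs.length : Nat) : Int) - pvLsuf cs
        = ((cs.length - pvLsuf cs : Nat) : Int) := by omega
    rw [ha, slice_past_end cs (cs.length - pvLsuf cs)]
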